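-- pv_equiv track=rewrite | github.com/EliasBelov/google_contacts | lib/src/cleaning_contacts.py | find_none_group_and_return_resource
-- ===== SOURCE A (Python) =====
-- def find_none_group_and_return_resource(input_dict):
--     r_list = []
--     for key, value_list in input_dict.items():
--         for info_dict in value_list:
--             if 'group' in info_dict and info_dict['group'] is None:
--                 for data in value_list:
--                     if 'resourceName' in data:
--                         r_list.append(data['resourceName'])
--     return r_list
-- ===== SOURCE B (Python) =====
-- def find_none_group_and_return_resource(input_dict):
--     r_list = []
--     for value_list in input_dict.values():
--         count = 0
--         names = []
--         for d in value_list: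
--             if 'group' in d and d['group'] is None:
--                 count += 1
--             if 'resourceName' in d:
--                 names.append(d['resourceName'])
--         r_list.extend(names * count)
--     return r_list
-- ===== Notes on version B (the rewrite author's own statement) =====
-- stated objective: alternative
-- what changed: Instead of re-scanning the whole value_list for resourceNames at every group-None entry, B makes one pass per list that counts group-None entries and collects resourceNames, then extends the result by names * count.
-- outside the precondition, e.g. on find_none_group_and_return_resource({'k': [{'group': None, 'resourceName': None}]}): A returns [None], B returns [None]
import Mathlib
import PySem

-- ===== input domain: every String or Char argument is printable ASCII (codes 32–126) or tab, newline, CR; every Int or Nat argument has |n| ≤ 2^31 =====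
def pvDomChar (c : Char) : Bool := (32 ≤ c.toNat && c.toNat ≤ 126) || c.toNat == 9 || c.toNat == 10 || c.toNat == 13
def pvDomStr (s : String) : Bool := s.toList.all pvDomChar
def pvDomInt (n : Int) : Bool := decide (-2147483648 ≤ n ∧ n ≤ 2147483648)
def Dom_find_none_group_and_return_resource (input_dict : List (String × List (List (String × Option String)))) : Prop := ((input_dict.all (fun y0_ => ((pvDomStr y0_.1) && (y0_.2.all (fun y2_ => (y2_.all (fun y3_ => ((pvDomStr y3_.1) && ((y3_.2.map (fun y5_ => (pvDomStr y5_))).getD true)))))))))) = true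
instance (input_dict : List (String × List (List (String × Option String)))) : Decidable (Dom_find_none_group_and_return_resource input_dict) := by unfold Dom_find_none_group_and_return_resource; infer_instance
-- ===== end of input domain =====

-- B makes one pass per value_list, counting group-None entries and collecting resourceNames once,
-- then extends the result by names * count, instead of re-scanning the list at every group-None entry.

-- ===== PORT A =====
-- Literal port of A: for each (key, value_list), for each info_dict with a 'group' key bound
-- to None, re-scan value_list and append every resourceName value.  Under Pre_ every appended
-- resourceName value is a string (never Python None), so the `some (some s)` match is exact.
def find_none_group_and_return_resource (input_dict : List (String × List (List (String × Option String)))) : List String :=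
  input_dict.foldl (fun r_list kv =>
    kv.2.foldl (fun r_list info_dict =>
      if (PySem.Dict.mk info_dict).get? "group" = some none then
        kv.2.foldl (fun r_list data =>
          match (PySem.Dict.mk data).get? "resourceName" with
          | some (some s) => r_list ++ [s]
          | _ => r_list) r_list
      else r_list) r_list) []

-- ===== PORT B =====
-- One pass per value_list: (count of group-None dicts, resourceNames in order); extend by names * count.
def find_none_group_and_return_resource_alt (input_dict : List (String × List (List (String × Option String)))) : List String :=
  input_dict.foldl (fun r_list kv =>
    let st := kv.2.foldl (fun (p : Nat × List String) d =>
      ((if (PySem.Dict.mk d).get? "group" = some none then p.1 + 1 else p.1),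
       (match (PySem.Dict.mk d).get? "resourceName" with
        | some v =>
          match v with
          | some s => p.2 ++ [s]
          | none => p.2
        | none => p.2))) (0, [])
    r_list ++ (List.replicate st.1 st.2).flatten) []

-- ===== PRECONDITION & SPEC =====
-- Pre_ excludes inputs where some value_list contains a group-None dict AND a dict whose
-- 'resourceName' value is Python None: there A (and B) return a list containing None, which
-- is not a value of the declared return type list[str].
def Pre_find_none_group_and_return_resource (input_dict : List (String × List (List (String × Option String)))) : Prop :=
  ∀ kv ∈ input_dict, (∃ d ∈ kv.2, (PySem.Dict.mk d).get? "group" = some none) →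
    ∀ d ∈ kv.2, (PySem.Dict.mk d).get? "resourceName" ≠ some none
instance (input_dict : List (String × List (List (String × Option String)))) : Decidable (Pre_find_none_group_and_return_resource input_dict) := by unfold Pre_find_none_group_and_return_resource; infer_instance
def pvWitness_find_none_group_and_return_resource : (List (String × List (List (String × Option String)))) :=
  [("k", [[("group", none), ("resourceName", some "people/c1")], [("resourceName", some "people/c2")]])]

def Spec_find_none_group_and_return_resource (input_dict : List (String × List (List (String × Option String)))) (out : List String) : Prop := out = find_none_group_and_return_resource_alt input_dict
instance (input_dict : List (String × List (List (String × Option String)))) (out : List String) : Decidable (Spec_find_none_group_and_return_resource input_dict out) := by unfold Spec_find_none_group_and_return_resource; infer_instance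

-- ===== CLAIM (what is proved, stated in full; the proofs are below) =====
def Claim_equal_find_none_group_and_return_resource : Prop := ∀ (input_dict : List (String × List (List (String × Option String)))), Dom_find_none_group_and_return_resource input_dict → Pre_find_none_group_and_return_resource input_dict → Spec_find_none_group_and_return_resource input_dict (find_none_group_and_return_resource input_dict)

-- ===== LEMMAS AND PROOFS =====

def pvRn (d : List (String × Option String)) : List String :=
  match (PySem.Dict.mk d).get? "resourceName" with
  | some (some s) => [s]
  | _ => []

def pvP (d : List (String × Option String)) : Bool :=
  (PySem.Dict.mk d).get? "group" == some none

def pvNames (vl : List (List (String × Option String))) : List String := vl.flatMap pvRn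

def pvF (vl : List (List (String × Option String))) : List String :=
  (List.replicate (vl.countP pvP) (pvNames vl)).flatten

lemma pvRn_step (r : List String) (d : List (String × Option String)) :
    (match (PySem.Dict.mk d).get? "resourceName" with
     | some (some s) => r ++ [s]
     | _ => r) = r ++ pvRn d := by
  unfold pvRn
  rcases (PySem.Dict.mk d).get? "resourceName" with _ | (_ | s) <;> simp

lemma pvRn_step' (r : List String) (d : List (String × Option String)) :
    (match (PySem.Dict.mk d).get? "resourceName" with
     | some v =>
       match v with
       | some s => r ++ [s]
       | none => r
     | none => r) = r ++ pvRn d := by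
  unfold pvRn
  rcases (PySem.Dict.mk d).get? "resourceName" with _ | (_ | s) <;> simp

lemma pv_inner3 (vl : List (List (String × Option String))) (r : List String) :
    vl.foldl (fun r_list data =>
      match (PySem.Dict.mk data).get? "resourceName" with
      | some (some s) => r_list ++ [s]
      | _ => r_list) r = r ++ pvNames vl := by
  have h : (fun (r_list : List String) data =>
      match (PySem.Dict.mk data).get? "resourceName" with
      | some (some s) => r_list ++ [s]
      | _ => r_list) = fun r_list d => r_list ++ pvRn d := by
    funext r_list d; exact pvRn_step r_list d
  rw [h, PySem.List.foldl_append_eq_flatMap]; rfl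

lemma pv_flatMap_ite (vl : List (List (String × Option String))) (N : List String) :
    vl.flatMap (fun d => if pvP d then N else []) = (List.replicate (vl.countP pvP) N).flatten := by
  induction vl with
  | nil => simp
  | cons d tl ih =>
    by_cases h : pvP d <;> simp [List.countP_cons, h, ih, List.replicate_succ]

lemma pv_middle (vl : List (List (String × Option String))) (N : List String) (r : List String) :
    vl.foldl (fun r_list d => if (PySem.Dict.mk d).get? "group" = some none then r_list ++ N else r_list) r
      = r ++ (List.replicate (vl.countP pvP) N).flatten := by
  have h : (fun (r_list : List String) d =>
      if (PySem.Dict.mk d).get? "group" = some none then r_list ++ N else r_list)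
      = fun r_list d => r_list ++ (if pvP d then N else []) := by
    funext r_list d
    by_cases h : (PySem.Dict.mk d).get? "group" = some none <;> simp [pvP, h]
  rw [h, PySem.List.foldl_append_eq_flatMap, pv_flatMap_ite]

lemma pv_a_list (vl : List (List (String × Option String))) (r : List String) :
    vl.foldl (fun r_list info_dict =>
      if (PySem.Dict.mk info_dict).get? "group" = some none then
        vl.foldl (fun r_list data =>
          match (PySem.Dict.mk data).get? "resourceName" with
          | some (some s) => r_list ++ [s]
          | _ => r_list) r_list
      else r_list) r = r ++ pvF vl := by
  have h : (fun (r_list : List String) (info_dict : List (String × Option String)) =>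
      if (PySem.Dict.mk info_dict).get? "group" = some none then
        vl.foldl (fun r_list data =>
          match (PySem.Dict.mk data).get? "resourceName" with
          | some (some s) => r_list ++ [s]
          | _ => r_list) r_list
      else r_list)
      = fun (r_list : List String) (d : List (String × Option String)) => if (PySem.Dict.mk d).get? "group" = some none then r_list ++ pvNames vl else r_list := by
    funext r_list d
    by_cases h : (PySem.Dict.mk d).get? "group" = some none <;> simp [h, pv_inner3]
  rw [h, pv_middle]; rfl

lemma pv_b_list_gen (vl : List (List (String × Option String))) (c : Nat) (ns : List String) :
    vl.foldl (fun (p : Nat × List String) d =>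
      ((if (PySem.Dict.mk d).get? "group" = some none then p.1 + 1 else p.1),
       (match (PySem.Dict.mk d).get? "resourceName" with
        | some v =>
          match v with
          | some s => p.2 ++ [s]
          | none => p.2
        | none => p.2))) (c, ns)
      = (c + vl.countP pvP, ns ++ pvNames vl) := by
  induction vl generalizing c ns with
  | nil => simp [pvNames]
  | cons d tl ih =>
    simp only [List.foldl_cons, pvRn_step' ns d, ih]
    by_cases h : (PySem.Dict.mk d).get? "group" = some none <;>
      simp [List.countP_cons, pvP, h, pvNames] <;> omega

lemma pv_b_list (vl : List (List (String × Option String))) :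
    vl.foldl (fun (p : Nat × List String) d =>
      ((if (PySem.Dict.mk d).get? "group" = some none then p.1 + 1 else p.1),
       (match (PySem.Dict.mk d).get? "resourceName" with
        | some v =>
          match v with
          | some s => p.2 ++ [s]
          | none => p.2
        | none => p.2))) (0, [])
      = (vl.countP pvP, pvNames vl) := by
  simpa using pv_b_list_gen vl 0 []

lemma pv_a_eq (input_dict : List (String × List (List (String × Option String)))) :
    find_none_group_and_return_resource input_dict = input_dict.flatMap (fun kv => pvF kv.2) := by
  unfold find_none_group_and_return_resource
  have h1 := PySem.List.foldl_congr_mem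
    (l := input_dict) (init := ([] : List String))
    (g := fun r_list kv => r_list ++ pvF kv.2)
    (f := fun r_list kv =>
      kv.2.foldl (fun r_list info_dict =>
        if (PySem.Dict.mk info_dict).get? "group" = some none then
          kv.2.foldl (fun r_list data =>
            match (PySem.Dict.mk data).get? "resourceName" with
            | some (some s) => r_list ++ [s]
            | _ => r_list) r_list
        else r_list) r_list)
    (fun acc kv _ => pv_a_list kv.2 acc)
  refine h1.trans ?_
  rw [PySem.List.foldl_append_eq_flatMap]; rfl

lemma pv_b_eq (input_dict : List (String × List (List (String × Option String)))) :
    find_none_group_and_return_resource_alt input_dict = input_dict.flatMap (fun kv => pvF kv.2) := by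
  unfold find_none_group_and_return_resource_alt
  have h1 := PySem.List.foldl_congr_mem
    (l := input_dict) (init := ([] : List String))
    (g := fun r_list kv => r_list ++ pvF kv.2)
    (f := fun r_list kv =>
      let st := kv.2.foldl (fun (p : Nat × List String) d =>
        ((if (PySem.Dict.mk d).get? "group" = some none then p.1 + 1 else p.1),
         (match (PySem.Dict.mk d).get? "resourceName" with
          | some v =>
            match v with
            | some s => p.2 ++ [s]
            | none => p.2
          | none => p.2))) (0, [])
      r_list ++ (List.replicate st.1 st.2).flatten)
    (fun acc kv _ => by simp only [pv_b_list kv.2]; rfl)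
  refine h1.trans ?_
  rw [PySem.List.foldl_append_eq_flatMap]; rfl

-- ===== VERDICT (by name: the statement is the Claim_ definition above) =====
theorem find_none_group_and_return_resource_spec : Claim_equal_find_none_group_and_return_resource := by
  intro input_dict _ _
  unfold Spec_find_none_group_and_return_resource
  rw [pv_a_eq, pv_b_eq]
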